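-- pv_equiv track=rewrite | github.com/UWPCE-PythonCert-ClassRepos/SP_Online_PY210 | students/steve-long/lesson05-excepts-comps/ex-5-1-comprehensions_lab/comprehensions_lab.py | multiples_of
-- ===== SOURCE A (Python) =====
-- def multiples_of(from_n, to_n, from_divisor, to_divisor):
--     """
--     Generate sets of multiples of numbers over a specified number and multiple
--     range. A generalized [5c] solution.
--
--     :param from_n ::= Lower number
--     :param to_n ::= Upper number
--     :param from_divisor ::= Lower multiple
--     :param to_divisor ::= Upper multiple
--     """
--     sets = None
--     try:
--         sets = [{n for n in range(from_n, (to_n + 1)) if (n % d == 0)}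
--                 for d in range(from_divisor, (to_divisor + 1))]
--     except TypeError as ex:
--         sets = None
--         raise ex
--     return sets
-- ===== SOURCE B (Python) =====
-- def multiples_of(from_n, to_n, from_divisor, to_divisor):
--     """Same result, but steps directly through the multiples of each divisor."""
--     sets = []
--     for d in range(from_divisor, to_divisor + 1):
--         ad = abs(d)
--         start = -(-from_n // ad) * ad   # smallest multiple of |d| that is >= from_n
--         sets.append(set(range(start, to_n + 1, ad)))
--     return sets
-- ===== Notes on version B (the rewrite author's own statement) =====
-- stated objective: alternative
-- what changed: Instead of testing every n in [from_n, to_n] for divisibility by each d, B computes the first multiple of |d| at or above from_n by ceiling division and enumerates the multiples directly with range(start, to_n+1, abs(d)); when the output itself is large (divisor 1) the cost is the same.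
-- outside the precondition, e.g. on multiples_of(5, 3, -1, 1): A returns [set(), set(), set()], B raises ZeroDivisionError; on multiples_of(1, 10, 0, 2): A raises ZeroDivisionError, B raises ZeroDivisionError
import Mathlib
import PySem

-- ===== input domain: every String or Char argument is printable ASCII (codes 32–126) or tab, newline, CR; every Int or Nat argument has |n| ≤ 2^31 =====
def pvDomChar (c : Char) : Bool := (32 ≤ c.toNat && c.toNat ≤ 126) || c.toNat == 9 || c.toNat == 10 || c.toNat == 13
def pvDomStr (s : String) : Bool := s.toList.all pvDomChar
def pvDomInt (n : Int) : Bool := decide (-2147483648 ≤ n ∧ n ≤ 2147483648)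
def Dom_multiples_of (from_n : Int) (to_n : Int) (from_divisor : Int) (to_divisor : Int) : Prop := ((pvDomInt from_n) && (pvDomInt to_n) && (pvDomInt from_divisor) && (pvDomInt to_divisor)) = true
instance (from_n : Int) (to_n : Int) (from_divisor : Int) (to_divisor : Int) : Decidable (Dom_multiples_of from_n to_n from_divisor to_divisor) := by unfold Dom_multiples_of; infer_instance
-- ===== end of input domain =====

-- B enumerates the multiples of each divisor directly (ceiling-division start, stepped range)
-- instead of testing every number in the range for divisibility; proved equal to A on Pre_.


-- ===== PORT A =====
def multiples_of (from_n : Int) (to_n : Int) (from_divisor : Int) (to_divisor : Int) : List (List Int) :=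
  (PySem.List.pyRange from_divisor (to_divisor + 1) 1).map (fun d =>
    (PySem.List.pyRange from_n (to_n + 1) 1).foldl
      (fun s n => if PySem.Int.mod n d = 0 then PySem.Set.add s n else s)
      PySem.Set.empty)

-- ===== PORT B =====
def multiples_of_alt (from_n : Int) (to_n : Int) (from_divisor : Int) (to_divisor : Int) : List (List Int) :=
  (PySem.List.pyRange from_divisor (to_divisor + 1) 1).foldl
    (fun sets d =>
      let ad : Int := |d|
      let start : Int := -(PySem.Int.floordiv (-from_n) ad) * ad
      sets ++ [PySem.Set.ofList (PySem.List.pyRange start (to_n + 1) ad)])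
    []

-- ===== PRECONDITION & SPEC =====
-- Pre_ excludes divisor ranges containing 0: there A raises ZeroDivisionError whenever the
-- number range is nonempty, and on the remaining (empty-number-range) corner B's ceiling
-- division by zero raises while A returns a list of empty sets.
def Pre_multiples_of (from_n : Int) (to_n : Int) (from_divisor : Int) (to_divisor : Int) : Prop :=
  ¬ (from_divisor ≤ 0 ∧ 0 ≤ to_divisor)
instance (from_n : Int) (to_n : Int) (from_divisor : Int) (to_divisor : Int) : Decidable (Pre_multiples_of from_n to_n from_divisor to_divisor) := by unfold Pre_multiples_of; infer_instance

def pvWitness_multiples_of : Int × Int × Int × Int := (1, 12, 1, 3)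

def Spec_multiples_of (from_n : Int) (to_n : Int) (from_divisor : Int) (to_divisor : Int) (out : List (List Int)) : Prop := out = multiples_of_alt from_n to_n from_divisor to_divisor
instance (from_n : Int) (to_n : Int) (from_divisor : Int) (to_divisor : Int) (out : List (List Int)) : Decidable (Spec_multiples_of from_n to_n from_divisor to_divisor out) := by unfold Spec_multiples_of; infer_instance

-- ===== CLAIM (what is proved, stated in full; the proofs are below) =====
def Claim_equal_multiples_of : Prop := ∀ (from_n : Int) (to_n : Int) (from_divisor : Int) (to_divisor : Int), Dom_multiples_of from_n to_n from_divisor to_divisor → Pre_multiples_of from_n to_n from_divisor to_divisor → Spec_multiples_of from_n to_n from_divisor to_divisor (multiples_of from_n to_n from_divisor to_divisor)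

-- ===== LEMMAS AND PROOFS =====

-- folding "add if p" over a duplicate-free list extends the accumulator by the filtered list
lemma pv_foldl_filter_add (p : Int → Prop) [DecidablePred p] :
    ∀ (l : List Int) (s : List Int), s.Nodup → (∀ x ∈ l, x ∉ s) → l.Nodup →
      l.foldl (fun s n => if p n then PySem.Set.add s n else s) s
        = s ++ l.filter (fun n => decide (p n)) := by
  intro l
  induction l with
  | nil => intro s _ _ _; simp
  | cons a l ih =>
    intro s hs hd hl
    have ha : a ∉ s := hd a (by simp)
    have hal : a ∉ l := (List.nodup_cons.mp hl).1
    by_cases hp : p a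
    · have hadd : PySem.Set.add s a = s ++ [a] := PySem.Set.add_of_not_mem ha
      have hs' : (s ++ [a]).Nodup := by
        exact hs.append (List.nodup_singleton a) (List.disjoint_singleton.mpr ha)
      have hd' : ∀ x ∈ l, x ∉ s ++ [a] := by
        intro x hx
        simp only [List.mem_append, List.mem_singleton]
        rintro (h | rfl)
        · exact hd x (by simp [hx]) h
        · exact hal hx
      simp only [List.foldl_cons, if_pos hp, hadd,
        ih (s ++ [a]) hs' hd' (List.nodup_cons.mp hl).2,
        List.filter_cons, decide_eq_true hp]
      simp
    · simp only [List.foldl_cons, if_neg hp,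
        ih s hs (fun x hx => hd x (by simp [hx])) (List.nodup_cons.mp hl).2,
        List.filter_cons]
      simp [hp]

-- set(l) of a duplicate-free list is the list itself
lemma pv_ofList_nodup :
    ∀ (l : List Int), l.Nodup → PySem.Set.ofList l = l := by
  have key : ∀ (l : List Int) (s : List Int), s.Nodup → (∀ x ∈ l, x ∉ s) → l.Nodup →
      l.foldl PySem.Set.add s = s ++ l := by
    intro l
    induction l with
    | nil => intro s _ _ _; simp
    | cons a l ih =>
      intro s hs hd hl
      have ha : a ∉ s := hd a (by simp)
      have hal : a ∉ l := (List.nodup_cons.mp hl).1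
      have hadd : PySem.Set.add s a = s ++ [a] := PySem.Set.add_of_not_mem ha
      have hs' : (s ++ [a]).Nodup := by
        exact hs.append (List.nodup_singleton a) (List.disjoint_singleton.mpr ha)
      have hd' : ∀ x ∈ l, x ∉ s ++ [a] := by
        intro x hx
        simp only [List.mem_append, List.mem_singleton]
        rintro (h | rfl)
        · exact hd x (by simp [hx]) h
        · exact hal hx
      simp [hadd, ih (s ++ [a]) hs' hd' (List.nodup_cons.mp hl).2]
  intro l hl
  rw [PySem.Set.ofList_eq_foldl]
  simpa using key l [] (by simp) (by simp) hl

-- a positive-step range is strictly increasing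
lemma pv_pairwise_pyRange_pos (a b s : Int) (hs : 0 < s) :
    (PySem.List.pyRange a b s).Pairwise (· < ·) := by
  rw [PySem.List.pyRange_of_pos a b hs]
  rw [List.pairwise_map]
  refine List.pairwise_lt_range.imp ?_
  intro i j hij
  have : (i : Int) < (j : Int) := by exact_mod_cast hij
  nlinarith

-- two strictly increasing lists with the same members are equal
lemma pv_eq_of_pairwise_lt_of_mem (xs ys : List Int)
    (hx : xs.Pairwise (· < ·)) (hy : ys.Pairwise (· < ·))
    (hm : ∀ a, a ∈ xs ↔ a ∈ ys) : xs = ys := by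
  have hnx : xs.Nodup := hx.imp (fun h => ne_of_lt h)
  have hny : ys.Nodup := hy.imp (fun h => ne_of_lt h)
  have hp : ys.Perm xs := (List.perm_ext_iff_of_nodup hny hnx).mpr (fun a => (hm a).symm)
  have h1 := PySem.List.sorted_eq_of_perm_of_pairwise_lt xs ys (fun x => x) hp hy
  have h2 := PySem.List.sorted_eq_of_perm_of_pairwise_lt xs xs (fun x => x) (List.Perm.refl xs) hx
  rw [h1] at h2
  exact h2.symm

-- a multiple of ad that exceeds -ad is nonnegative
lemma pv_nonneg_of_dvd (ad m : Int) (had : 0 < ad) (hdvd : ad ∣ m) (hlt : -ad < m) : 0 ≤ m := by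
  obtain ⟨k, rfl⟩ := hdvd
  by_cases hk : 0 ≤ k
  · exact mul_nonneg had.le hk
  · have hk1 : k ≤ -1 := by omega
    nlinarith

-- the per-divisor sets agree for every nonzero divisor
lemma pv_inner_eq (from_n to_n d : Int) (hd : d ≠ 0) :
    (PySem.List.pyRange from_n (to_n + 1) 1).foldl
      (fun s n => if PySem.Int.mod n d = 0 then PySem.Set.add s n else s) PySem.Set.empty
    = PySem.Set.ofList
        (PySem.List.pyRange (-(PySem.Int.floordiv (-from_n) |d|) * |d|) (to_n + 1) |d|) := by
  set ad : Int := |d| with had_def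
  have had : 0 < ad := abs_pos.mpr hd
  set q : Int := -(PySem.Int.floordiv (-from_n) ad) with hq
  have hqspec : (q - 1) * ad < from_n ∧ from_n ≤ q * ad :=
    (PySem.Int.neg_floordiv_neg_eq_iff_of_pos had).mp hq.symm
  set start : Int := q * ad with hstart
  have hdvd_start : ad ∣ start := Dvd.intro_left q rfl
  have hlow : from_n ≤ start := hqspec.2
  have hhigh : start < from_n + ad := by nlinarith [hqspec.1]
  -- left side: the filtered one-step range
  have hL : (PySem.List.pyRange from_n (to_n + 1) 1).foldl
      (fun s n => if PySem.Int.mod n d = 0 then PySem.Set.add s n else s) PySem.Set.empty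
      = (PySem.List.pyRange from_n (to_n + 1) 1).filter
          (fun n => decide (PySem.Int.mod n d = 0)) := by
    have := pv_foldl_filter_add (fun n => PySem.Int.mod n d = 0)
      (PySem.List.pyRange from_n (to_n + 1) 1) [] (by simp) (by simp)
      (PySem.List.nodup_pyRange_one from_n (to_n + 1))
    simpa [PySem.Set.empty] using this
  -- right side: the stepped range itself
  have hnodR : (PySem.List.pyRange start (to_n + 1) ad).Pairwise (· < ·) :=
    pv_pairwise_pyRange_pos start (to_n + 1) ad had
  have hR : PySem.Set.ofList (PySem.List.pyRange start (to_n + 1) ad)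
      = PySem.List.pyRange start (to_n + 1) ad :=
    pv_ofList_nodup _ (hnodR.imp (fun h => ne_of_lt h))
  rw [hL, hR]
  apply pv_eq_of_pairwise_lt_of_mem
  · exact (PySem.List.pairwise_lt_pyRange_one from_n (to_n + 1)).filter _
  · exact hnodR
  · intro x
    rw [List.mem_filter, PySem.List.mem_pyRange_one,
      PySem.List.mem_pyRange_iff_of_pos had x]
    simp only [decide_eq_true_eq, PySem.Int.mod_eq_zero_iff_dvd]
    constructor
    · rintro ⟨⟨hx1, hx2⟩, hx3⟩
      have hadx : ad ∣ x := (abs_dvd d x).mpr hx3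
      refine ⟨?_, hx2, ?_⟩
      · have hdvd_sub : ad ∣ x - start := dvd_sub hadx hdvd_start
        have : -ad < x - start := by omega
        have := pv_nonneg_of_dvd ad (x - start) had hdvd_sub this
        omega
      · exact dvd_sub hadx hdvd_start
    · rintro ⟨hx1, hx2, hx3⟩
      have hadx : ad ∣ x := by
        have := dvd_add hx3 hdvd_start
        simpa using this
      exact ⟨⟨le_trans hlow hx1, hx2⟩, (abs_dvd d x).mp hadx⟩

-- ===== VERDICT (by name: the statement is the Claim_ definition above) =====
theorem multiples_of_spec : Claim_equal_multiples_of := by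
  intro from_n to_n from_divisor to_divisor _ hpre
  unfold Spec_multiples_of multiples_of multiples_of_alt
  rw [PySem.List.foldl_append_singleton_eq_map]
  simp only [List.nil_append]
  apply List.map_congr_left
  intro d hd
  have hmem := (PySem.List.mem_pyRange_one).mp hd
  have hdne : d ≠ 0 := by
    intro h
    exact hpre ⟨by omega, by omega⟩
  exact pv_inner_eq from_n to_n d hdne
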